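-- pv_equiv track=rewrite | github.com/Ice-Hazymoon/Constellate | python/annotate_deep_sky.py | choose_common_name
-- ===== SOURCE A (Python) =====
-- def choose_common_name(names: list[str]) -> str | None:
--     cleaned = [name.strip() for name in names if name and name.strip()]
--     if not cleaned:
--         return None
--     for candidate in cleaned:
--         if any(character.isupper() for character in candidate):
--             return candidate
--     for candidate in cleaned:
--         if " " in candidate:
--             return candidate
--     for candidate in cleaned:
--         if any(character.isalpha() for character in candidate):
--             return candidate
--     return cleaned[0]
-- ===== SOURCE B (Python) =====
-- def choose_common_name(names: list[str]) -> str | None: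
--     cleaned = [name.strip() for name in names if name and name.strip()]
--     if not cleaned:
--         return None
--
--     def priority(candidate: str) -> int:
--         if any(character.isupper() for character in candidate):
--             return 0
--         if " " in candidate:
--             return 1
--         if any(character.isalpha() for character in candidate):
--             return 2
--         return 3
--
--     return min(cleaned, key=priority)
-- ===== Notes on version B (the rewrite author's own statement) =====
-- stated objective: simpler
-- what changed: Replaces A's three sequential full scans over the cleaned list with a single min() scan driven by a 4-level priority key (Python's min keeps the first minimal element, matching A's first-match tie-breaking).
import Mathlib
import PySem

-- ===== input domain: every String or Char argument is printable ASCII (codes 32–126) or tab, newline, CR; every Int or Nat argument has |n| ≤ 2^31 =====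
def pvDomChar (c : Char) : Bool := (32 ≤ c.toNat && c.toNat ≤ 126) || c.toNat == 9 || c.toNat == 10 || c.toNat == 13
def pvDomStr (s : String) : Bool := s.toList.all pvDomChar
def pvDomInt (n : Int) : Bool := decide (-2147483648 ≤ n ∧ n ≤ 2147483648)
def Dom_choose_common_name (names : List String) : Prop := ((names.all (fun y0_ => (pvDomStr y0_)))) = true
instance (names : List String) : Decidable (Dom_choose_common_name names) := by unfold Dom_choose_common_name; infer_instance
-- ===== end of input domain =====

-- B replaces A's three sequential scans over the cleaned names with one min() scan
-- driven by a 4-level priority key (simpler decomposition; same results incl. ties).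


-- shared tiny predicate helpers (any(ch.isupper()), " " in s, any(ch.isalpha()))
def pvHasUpper (s : String) : Bool := s.toList.any PySem.Chars.isupper
def pvHasSpace (s : String) : Bool := PySem.Str.isIn " " s
def pvHasAlpha (s : String) : Bool := s.toList.any PySem.Chars.isalpha

-- ===== PORT A =====
def choose_common_name (names : List String) : Option String :=
  let cleaned := (names.filter (fun n => !(n == "") && !(PySem.Str.strip n == ""))).map PySem.Str.strip
  if cleaned == [] then none
  else
    match cleaned.find? pvHasUpper with
    | some c => some c
    | none =>
      match cleaned.find? pvHasSpace with
      | some c => some c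
      | none =>
        match cleaned.find? pvHasAlpha with
        | some c => some c
        | none => PySem.List.pyGet? cleaned 0

-- ===== PORT B =====
def pvPriority (c : String) : Int :=
  if pvHasUpper c then 0
  else if pvHasSpace c then 1
  else if pvHasAlpha c then 2
  else 3

def choose_common_name_alt (names : List String) : Option String :=
  let cleaned := (names.filter (fun n => !(n == "") && !(PySem.Str.strip n == ""))).map PySem.Str.strip
  if cleaned == [] then none
  else PySem.List.min? cleaned pvPriority

-- ===== PRECONDITION & SPEC =====
def Spec_choose_common_name (names : List String) (out : Option String) : Prop := out = choose_common_name_alt names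
instance (names : List String) (out : Option String) : Decidable (Spec_choose_common_name names out) := by unfold Spec_choose_common_name; infer_instance

-- ===== CLAIM (what is proved, stated in full; the proofs are below) =====
def Claim_equal_choose_common_name : Prop := ∀ (names : List String), Dom_choose_common_name names → Spec_choose_common_name names (choose_common_name names)

-- ===== LEMMAS AND PROOFS =====

/-- the running "keep the better" step of Python's `min` with a key -/
def pvBetter (m x : String) : String := if pvPriority x < pvPriority m then x else m

theorem min?_cons (x : String) (t : List String) :
    PySem.List.min? (x :: t) pvPriority = some (t.foldl pvBetter x) := by
  unfold PySem.List.min?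
  simp only [List.foldl_cons]
  induction t generalizing x with
  | nil => rfl
  | cons y s ih =>
    simp only [List.foldl_cons, pvBetter]
    by_cases h : pvPriority y < pvPriority x <;> simp only [h, reduceIte] <;> exact ih _

/-- the cascade of first-match scans, seeded with a current best `m` -/
theorem foldl_better_eq_cascade (l : List String) : ∀ (m : String),
    l.foldl pvBetter m =
    if pvHasUpper m then m
    else
      match l.find? pvHasUpper with
      | some c => c
      | none =>
        if pvHasSpace m then m
        else
          match l.find? pvHasSpace with
          | some c => c
          | none =>
            if pvHasAlpha m then m
            else
              match l.find? pvHasAlpha with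
              | some c => c
              | none => m := by
  induction l with
  | nil =>
    intro m
    by_cases h0 : pvHasUpper m <;> by_cases h1 : pvHasSpace m <;> by_cases h2 : pvHasAlpha m <;>
      simp
  | cons x t ih =>
    intro m
    simp only [List.foldl_cons, List.find?_cons]
    rw [ih]
    unfold pvBetter pvPriority
    by_cases hx0 : pvHasUpper x <;> by_cases hx1 : pvHasSpace x <;> by_cases hx2 : pvHasAlpha x <;>
      by_cases hm0 : pvHasUpper m <;> by_cases hm1 : pvHasSpace m <;> by_cases hm2 : pvHasAlpha m <;>
        simp [hx0, hx1, hx2, hm0, hm1, hm2]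

theorem cascade_eq_min? (x : String) (t : List String) :
    (match (x :: t).find? pvHasUpper with
     | some c => some c
     | none =>
       match (x :: t).find? pvHasSpace with
       | some c => some c
       | none =>
         match (x :: t).find? pvHasAlpha with
         | some c => some c
         | none => some x)
    = PySem.List.min? (x :: t) pvPriority := by
  rw [min?_cons, foldl_better_eq_cascade]
  simp only [List.find?_cons]
  by_cases hx0 : pvHasUpper x <;> by_cases hx1 : pvHasSpace x <;> by_cases hx2 : pvHasAlpha x <;>
    simp [hx0, hx1, hx2]
  all_goals
    cases h0 : List.find? pvHasUpper t <;>
    cases h1 : List.find? pvHasSpace t <;>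
    cases h2 : List.find? pvHasAlpha t <;>
    simp

-- ===== VERDICT (by name: the statement is the Claim_ definition above) =====
theorem choose_common_name_spec : Claim_equal_choose_common_name := by
  intro names _
  unfold Spec_choose_common_name choose_common_name choose_common_name_alt
  cases h : (names.filter (fun n => !(n == "") && !(PySem.Str.strip n == ""))).map PySem.Str.strip with
  | nil => simp
  | cons x t =>
    simp [PySem.List.pyGet?, PySem.List.pyIdx?]
    exact cascade_eq_min? x t
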